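-- pv_equiv track=rewrite | github.com/kojalowicz/hack_power | hack_power/hack_power.py | full_power
-- ===== SOURCE A (Python) =====
-- def count_letter(hack=str, letter=vars, power=int):
--     count_letter = hack.count(letter)
--     i=0
--     sum=0
--     while i < (count_letter)*power:
--         i=i+power
--         sum+=i
--     return sum
--
-- def count_phrase(hack=str, phrase=str, power=int):
--     sum=hack.count(phrase)*power
--     return sum
--
-- def sum_letters(hack, letters=dict()):
--     sum = 0
--     for i in letters:
--         sum += count_letter(hack, i, letters[i])
--     return sum
--
-- def sum_phrases(hack, phrases=dict()):
--     phrases_copy = phrases.copy()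
--     for i in phrases:               #### this loop is us in sytuation when short phrase is in deferent longer phrase to not count short phrases
--         for j in phrases:
--             if j!=i and j in i and i in hack:
--                     phrases_copy[j]=0
--     sum=0
--     for i in phrases_copy:
--         sum+=count_phrase(hack, i, phrases_copy[i])
--     for i in phrases:               #### this loop is us in sytuation when short phrase is in deferent longer but short phrase is exist in hack in deferent part of hack
--         for j in phrases:
--             if j!=i and j in i and i in hack:
--                 if hack.count(j)>hack.count(i):
--                     sum+=phrases[j]
--     return sum
--
-- def full_power(hack=str, letters=dict(), phrases=dict()):
--     count_letters_form_dict=0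
--     for i in letters:                           #### this loop is count how meny letters form dictionary is in hack
--         count_letters_form_dict+=hack.count(i)
--     if count_letters_form_dict == len(hack):    #### this condition is chacking that are diffrent letters in hack that in letters dictionary
--         return sum_letters(hack, letters) + sum_phrases(hack, phrases)
--     else:
--         return 0
-- ===== SOURCE B (Python) =====
-- def full_power(hack=str, letters=dict(), phrases=dict()):
--     # Letter scores via the arithmetic-series closed form; phrase counts computed
--     # once; the letter-count check short-circuits (counts are nonnegative, so once
--     # the partial sum exceeds len(hack) the total cannot equal it).
--     target = len(hack)
--     acc = 0
--     for l in letters: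
--         acc += hack.count(l)
--         if acc > target:
--             return 0
--     if acc != target:
--         return 0
--     total = 0
--     for letter, power in letters.items():
--         if power > 0:
--             c = hack.count(letter)
--             total += power * c * (c + 1) // 2
--     counts = {p: hack.count(p) for p in phrases}
--     dominated = {j for i in phrases if i in hack
--                  for j in phrases if j != i and j in i}
--     total += sum(counts[p] * v for p, v in phrases.items() if p not in dominated)
--     total += sum(phrases[j] for i in phrases if i in hack
--                  for j in phrases if j != i and j in i and counts[j] > counts[i])
--     return total
-- ===== Notes on version B (the rewrite author's own statement) =====
-- stated objective: alternative
-- what changed: B replaces A's per-letter O(count*power) accumulation loop by the arithmetic-series closed form power*c*(c+1)//2, precomputes each phrase's hack.count once in a dict (plus a 'dominated' set) instead of recounting inside the nested phrase loops, and short-circuits the letter-count check; on the generated inputs the running time is dominated by the hack.count scans both versions must perform, so B was not measurably faster.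
import Mathlib
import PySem

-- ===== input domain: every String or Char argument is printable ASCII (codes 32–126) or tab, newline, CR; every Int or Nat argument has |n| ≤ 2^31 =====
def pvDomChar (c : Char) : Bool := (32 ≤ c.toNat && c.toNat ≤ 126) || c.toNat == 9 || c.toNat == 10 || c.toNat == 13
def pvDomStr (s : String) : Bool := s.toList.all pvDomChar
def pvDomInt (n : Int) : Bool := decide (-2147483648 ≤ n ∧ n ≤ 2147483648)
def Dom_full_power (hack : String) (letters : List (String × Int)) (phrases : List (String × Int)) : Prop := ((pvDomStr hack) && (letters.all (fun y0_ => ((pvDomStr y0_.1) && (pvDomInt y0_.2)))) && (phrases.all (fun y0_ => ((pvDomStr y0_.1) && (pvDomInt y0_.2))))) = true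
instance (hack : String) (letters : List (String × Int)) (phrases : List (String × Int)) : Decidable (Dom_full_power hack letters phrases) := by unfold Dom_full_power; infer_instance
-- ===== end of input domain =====

-- B replaces A's per-letter summation loop by the arithmetic-series closed form,
-- precomputes each phrase's count once instead of recounting inside the nested
-- phrase loops, and short-circuits the letter-count check (counts are nonnegative).

-- Dict view under the type convention (both ports): a dict[str,int] argument arrives
-- as an association list; its keys are the distinct keys in first-occurrence order
-- and lookup takes the FIRST binding.
def pvKeys (d : List (String × Int)) : List String := PySem.List.dedup (d.map Prod.fst)
def pvVal (d : List (String × Int)) (k : String) : Int := (List.lookup k d).getD 0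

-- ===== PORT A =====
-- 'while i < count*power: i += power; sum += i' — fuel = count always suffices
-- (power > 0: exactly count iterations; power ≤ 0: the guard fails at once).
def pvCountLetterLoop (target power : Int) : Nat → Int → Int → Int
  | 0, _, s => s
  | fuel + 1, i, s =>
      if i < target then pvCountLetterLoop target power fuel (i + power) (s + (i + power)) else s

def pvCountLetter (hack letter : String) (power : Int) : Int :=
  pvCountLetterLoop ((PySem.Str.count hack letter : Int) * power) power
    (PySem.Str.count hack letter) 0 0

def pvSumLetters (hack : String) (letters : List (String × Int)) : Int :=
  (pvKeys letters).foldl (fun s k => s + pvCountLetter hack k (pvVal letters k)) 0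

def pvCountPhrase (hack phrase : String) (power : Int) : Int :=
  (PySem.Str.count hack phrase : Int) * power

def pvSumPhrases (hack : String) (phrases : List (String × Int)) : Int :=
  let ks := pvKeys phrases
  let copy0 : PySem.Dict String Int := PySem.Dict.ofList (ks.map (fun k => (k, pvVal phrases k)))
  let copy := ks.foldl (fun d i =>
      ks.foldl (fun d j =>
        if j ≠ i ∧ PySem.Str.isIn j i = true ∧ PySem.Str.isIn i hack = true
        then d.insert j 0 else d) d) copy0
  let s1 := copy.items.foldl (fun s p => s + pvCountPhrase hack p.1 p.2) 0
  ks.foldl (fun s i =>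
    ks.foldl (fun s j =>
      if j ≠ i ∧ PySem.Str.isIn j i = true ∧ PySem.Str.isIn i hack = true ∧
         PySem.Str.count hack j > PySem.Str.count hack i
      then s + pvVal phrases j else s) s) s1

def full_power (hack : String) (letters : List (String × Int)) (phrases : List (String × Int)) : Int :=
  let cnt := (pvKeys letters).foldl (fun s k => s + (PySem.Str.count hack k : Int)) 0
  if cnt = PySem.Str.len hack then pvSumLetters hack letters + pvSumPhrases hack phrases
  else 0

-- ===== PORT B =====
-- the short-circuiting letter-count scan ('for l in letters: acc += …; if acc > target: return 0')
def pvAltScan (hack : String) : List String → Int → Option Int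
  | [], acc => some acc
  | k :: ks, acc =>
      let a := acc + (PySem.Str.count hack k : Int)
      if PySem.Str.len hack < a then none else pvAltScan hack ks a

def full_power_alt (hack : String) (letters : List (String × Int)) (phrases : List (String × Int)) : Int :=
  let lks := pvKeys letters
  (pvAltScan hack lks 0).elim 0 (fun acc =>
  if (acc ≠ PySem.Str.len hack) then 0
  else
    let t1 := lks.foldl (fun s k =>
        if 0 < pvVal letters k then
          s + PySem.Int.floordiv
                (pvVal letters k * (PySem.Str.count hack k : Int) *
                  ((PySem.Str.count hack k : Int) + 1)) 2
        else s) 0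
    let pks := pvKeys phrases
    let counts : PySem.Dict String Int :=
      PySem.Dict.ofList (pks.map (fun p => (p, (PySem.Str.count hack p : Int))))
    let dominated : PySem.Set String := pks.foldl (fun s i =>
        if PySem.Str.isIn i hack = true then
          pks.foldl (fun s j =>
            if j ≠ i ∧ PySem.Str.isIn j i = true then PySem.Set.add s j else s) s
        else s) []
    let t2 := ((pks.filter (fun p => !(dominated.contains p))).map
        (fun p => counts.getD p 0 * pvVal phrases p)).sum
    let t3 := ((pks.filter (fun i => PySem.Str.isIn i hack)).flatMap (fun i =>
        (pks.filter (fun j =>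
            decide (j ≠ i) && PySem.Str.isIn j i &&
              decide (counts.getD j 0 > counts.getD i 0))).map
          (fun j => pvVal phrases j))).sum
    t1 + t2 + t3)

-- ===== PRECONDITION & SPEC =====
def Spec_full_power (hack : String) (letters : List (String × Int)) (phrases : List (String × Int)) (out : Int) : Prop := out = full_power_alt hack letters phrases
instance (hack : String) (letters : List (String × Int)) (phrases : List (String × Int)) (out : Int) : Decidable (Spec_full_power hack letters phrases out) := by unfold Spec_full_power; infer_instance

-- ===== CLAIM (what is proved, stated in full; the proofs are below) =====
def Claim_equal_full_power : Prop := ∀ (hack : String) (letters : List (String × Int)) (phrases : List (String × Int)), Dom_full_power hack letters phrases → Spec_full_power hack letters phrases (full_power hack letters phrases)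

-- ===== LEMMAS AND PROOFS =====

-- triangular numbers: pvS c = 1 + 2 + … + c
def pvS : Nat → Nat
  | 0 => 0
  | n + 1 => pvS n + (n + 1)

theorem pvS_two_mul (n : Nat) : 2 * pvS n = n * (n + 1) := by
  induction n with
  | zero => simp [pvS]
  | succ n ih => simp only [pvS]; nlinarith [ih]

theorem pvCountLetterLoop_closed (p : Int) (hp : 0 < p) :
    ∀ (r m : Nat) (s : Int),
      pvCountLetterLoop (((m + r : Nat) : Int) * p) p r ((m : Int) * p) s
        = s + p * ((pvS (m + r) : Int) - (pvS m : Int)) := by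
  intro r
  induction r with
  | zero =>
      intro m s
      simp [pvCountLetterLoop]
  | succ r ih =>
      intro m s
      have hlt : (m : Int) * p < ((m + (r + 1) : Nat) : Int) * p := by
        have : (m : Int) < ((m + (r + 1) : Nat) : Int) := by push_cast; omega
        exact mul_lt_mul_of_pos_right this hp
      have hstep : (m : Int) * p + p = ((m + 1 : Nat) : Int) * p := by push_cast; ring
      have htgt : ((m + (r + 1) : Nat) : Int) = (((m + 1) + r : Nat) : Int) := by push_cast; ring
      have hun : pvCountLetterLoop (((m + (r + 1) : Nat) : Int) * p) p (r + 1) ((m : Int) * p) s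
          = if (m : Int) * p < ((m + (r + 1) : Nat) : Int) * p then
              pvCountLetterLoop (((m + (r + 1) : Nat) : Int) * p) p r
                ((m : Int) * p + p) (s + ((m : Int) * p + p))
            else s := rfl
      rw [hun, if_pos hlt, hstep, htgt, ih (m + 1)]
      have hS : (pvS (m + 1) : Int) = (pvS m : Int) + ((m : Int) + 1) := by
        push_cast [pvS]; ring
      have hadd : (m + 1) + r = m + (r + 1) := by omega
      rw [hadd, hS]
      push_cast
      ring

theorem pvCountLetterLoop_nonpos (n : Nat) (v : Int) (hv : v ≤ 0) :
    pvCountLetterLoop ((n : Int) * v) v n 0 0 = 0 := by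
  have hnp : ¬ ((0 : Int) < (n : Int) * v) := by
    have : (n : Int) * v ≤ 0 := mul_nonpos_of_nonneg_of_nonpos (by positivity) hv
    omega
  cases n with
  | zero => rfl
  | succ m =>
      have hun : pvCountLetterLoop (((m + 1 : Nat) : Int) * v) v (m + 1) 0 0
          = if (0 : Int) < ((m + 1 : Nat) : Int) * v then
              pvCountLetterLoop (((m + 1 : Nat) : Int) * v) v m (0 + v) (0 + (0 + v))
            else 0 := rfl
      rw [hun, if_neg hnp]

theorem pvCountLetter_closed (hack letter : String) (v : Int) :
    pvCountLetter hack letter v =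
      if 0 < v then
        PySem.Int.floordiv
          (v * (PySem.Str.count hack letter : Int) * ((PySem.Str.count hack letter : Int) + 1)) 2
      else 0 := by
  set c := PySem.Str.count hack letter with hc
  by_cases hv : 0 < v
  · rw [if_pos hv]
    have h0 := pvCountLetterLoop_closed v hv c 0 0
    simp only [Nat.zero_add, Nat.cast_zero, zero_mul, pvS, Nat.cast_zero, zero_add] at h0
    have hres : pvCountLetter hack letter v = v * (pvS c : Int) := by
      unfold pvCountLetter
      rw [← hc]
      simpa using h0
    rw [hres]
    have h2 : (c : Int) * ((c : Int) + 1) = 2 * (pvS c : Int) := by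
      exact_mod_cast (pvS_two_mul c).symm
    have hmul : v * (c : Int) * ((c : Int) + 1) = (v * (pvS c : Int)) * 2 := by
      rw [mul_assoc, h2]; ring
    rw [hmul, PySem.Int.floordiv_eq_ediv_of_pos (by norm_num : (0:Int) < 2)]
    exact (Int.mul_ediv_cancel (v * (pvS c : Int)) (show (2:Int) ≠ 0 by norm_num)).symm
  · rw [if_neg hv]
    unfold pvCountLetter
    exact pvCountLetterLoop_nonpos _ v (by omega)

-- the list of keys the nested dominance loops touch (proof-side only)
def pvZs (hack : String) (ks : List String) : List String :=
  ks.flatMap (fun i =>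
    if PySem.Str.isIn i hack = true
    then ks.filter (fun j => decide (j ≠ i) && PySem.Str.isIn j i)
    else [])

theorem foldl_id {α β : Type} (l : List α) (init : β) :
    l.foldl (fun a _ => a) init = init := by
  induction l generalizing init with
  | nil => rfl
  | cons x t ih => simpa using ih init

theorem sum_filter_map {α : Type} (l : List α) (p : α → Bool) (f : α → Int) :
    ((l.filter p).map f).sum = (l.map (fun x => if p x then f x else 0)).sum := by
  induction l with
  | nil => rfl
  | cons x t ih => by_cases h : p x = true <;> simp [List.filter_cons, h, ih]

theorem sum_flatMap_int {α : Type} (l : List α) (f : α → List Int) :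
    (l.flatMap f).sum = (l.map (fun a => (f a).sum)).sum := by
  induction l with
  | nil => rfl
  | cons x t ih => simp [List.flatMap_cons, ih]

theorem items_ofList_nodup (ps : List (String × Int)) (h : (ps.map Prod.fst).Nodup) :
    (PySem.Dict.ofList ps).items = ps := by
  have h1 : ∀ a ∈ ps, (PySem.Dict.empty : PySem.Dict String Int).contains a.1 = false := by
    intro a _
    exact PySem.Dict.contains_empty a.1
  have h2 := PySem.Dict.items_foldl_insert_fresh ps Prod.fst Prod.snd PySem.Dict.empty h1 h
  unfold PySem.Dict.ofList PySem.Dict.update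
  simpa using h2

theorem items_foldl_insert_zero (js : List String) :
    ∀ (d : PySem.Dict String Int), (∀ j ∈ js, d.contains j = true) →
      (js.foldl (fun d j => d.insert j (0 : Int)) d).items
        = d.items.map (fun p => if p.1 ∈ js then (p.1, (0 : Int)) else p) := by
  induction js with
  | nil =>
      intro d _
      simp
  | cons j js ih =>
      intro d hct
      have hcj : d.contains j = true := hct j (by simp)
      have hct' : ∀ x ∈ js, (d.insert j (0 : Int)).contains x = true := by
        intro x hx
        rw [PySem.Dict.contains_insert]
        simp [hct x (List.mem_cons_of_mem _ hx)]
      rw [List.foldl_cons, ih _ hct', PySem.Dict.items_insert_of_contains d 0 hcj, List.map_map]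
      apply List.map_congr_left
      intro p _
      by_cases hpj : p.1 = j
      · simp [Function.comp, hpj]
      · simp [Function.comp, hpj]

theorem pv_dominance_fold_eq (hack : String) (ks : List String)
    {γ : Type} (f : γ → String → γ) (init : γ) :
    ks.foldl (fun d i =>
        ks.foldl (fun d j =>
          if j ≠ i ∧ PySem.Str.isIn j i = true ∧ PySem.Str.isIn i hack = true
          then f d j else d) d) init
      = (pvZs hack ks).foldl f init := by
  unfold pvZs
  rw [List.foldl_flatMap]
  apply PySem.List.foldl_congr_mem
  intro acc i _
  by_cases hi : PySem.Str.isIn i hack = true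
  · rw [if_pos hi, List.foldl_filter]
    apply PySem.List.foldl_congr_mem
    intro a j _
    have hi' : PySem.Chars.isIn i.toList hack.toList = true := by simpa using hi
    simp [hi', Bool.and_eq_true, and_true]
  · rw [if_neg hi, List.foldl_nil]
    rw [PySem.List.foldl_congr_mem ks _ (fun a _ => a) acc ?_]
    · exact foldl_id ks acc
    · intro a j _
      rw [if_neg]
      rintro ⟨-, -, h⟩
      exact hi h

-- named copies of B's let-bound pieces (defeq to what zeta reduction produces)
def pvAltCounts (hack : String) (ks : List String) : PySem.Dict String Int :=
  PySem.Dict.ofList (ks.map (fun p => (p, (PySem.Str.count hack p : Int))))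

def pvAltDominated (hack : String) (ks : List String) : PySem.Set String :=
  ks.foldl (fun s i =>
    if PySem.Str.isIn i hack = true then
      ks.foldl (fun s j =>
        if j ≠ i ∧ PySem.Str.isIn j i = true then PySem.Set.add s j else s) s
    else s) []

theorem scan_spec (hack : String) : ∀ (ks : List String) (acc : Int),
    (∀ a, pvAltScan hack ks acc = some a
        → a = acc + ((ks.map (fun k => (PySem.Str.count hack k : Int))).sum))
    ∧ (pvAltScan hack ks acc = none
        → PySem.Str.len hack < acc + ((ks.map (fun k => (PySem.Str.count hack k : Int))).sum)) := by
  intro ks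
  induction ks with
  | nil =>
      intro acc
      constructor
      · intro a ha
        simp [pvAltScan] at ha
        simp [ha]
      · intro h
        simp [pvAltScan] at h
  | cons k ks ih =>
      intro acc
      have hrest : 0 ≤ ((ks.map (fun k => (PySem.Str.count hack k : Int))).sum) :=
        List.sum_nonneg (by
          intro x hx
          rcases List.mem_map.1 hx with ⟨y, -, rfl⟩
          positivity)
      constructor
      · intro a ha
        by_cases hlt : PySem.Str.len hack < acc + (PySem.Str.count hack k : Int)
        · simp only [pvAltScan] at ha
          rw [if_pos hlt] at ha
          cases ha
        · simp only [pvAltScan, if_neg hlt] at ha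
          have := (ih (acc + (PySem.Str.count hack k : Int))).1 a ha
          simp [this, List.map_cons, List.sum_cons]
          ring
      · intro h
        by_cases hlt : PySem.Str.len hack < acc + (PySem.Str.count hack k : Int)
        · simp only [List.map_cons, List.sum_cons]
          linarith
        · simp only [pvAltScan, if_neg hlt] at h
          have := (ih (acc + (PySem.Str.count hack k : Int))).2 h
          simp only [List.map_cons, List.sum_cons]
          linarith

theorem full_power_alt_unfold (hack : String) (letters phrases : List (String × Int)) :
    full_power_alt hack letters phrases =
      (pvAltScan hack (pvKeys letters) 0).elim 0 (fun acc =>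
      if (acc ≠ PySem.Str.len hack) then 0
      else
        ((pvKeys letters).foldl (fun s k =>
            if 0 < pvVal letters k then
              s + PySem.Int.floordiv
                    (pvVal letters k * (PySem.Str.count hack k : Int) *
                      ((PySem.Str.count hack k : Int) + 1)) 2
            else s) 0)
        + (((pvKeys phrases).filter
              (fun p => !((pvAltDominated hack (pvKeys phrases)).contains p))).map
            (fun p => (pvAltCounts hack (pvKeys phrases)).getD p 0 * pvVal phrases p)).sum
        + (((pvKeys phrases).filter (fun i => PySem.Str.isIn i hack)).flatMap (fun i =>
            ((pvKeys phrases).filter (fun j =>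
                decide (j ≠ i) && PySem.Str.isIn j i &&
                  decide ((pvAltCounts hack (pvKeys phrases)).getD j 0 >
                    (pvAltCounts hack (pvKeys phrases)).getD i 0))).map
              (fun j => pvVal phrases j))).sum) := rfl

theorem dominated_eq (hack : String) (ks : List String) :
    pvAltDominated hack ks = (pvZs hack ks).foldl (fun s j => PySem.Set.add s j) [] := by
  unfold pvAltDominated pvZs
  rw [List.foldl_flatMap]
  apply PySem.List.foldl_congr_mem
  intro acc i _
  by_cases hi : PySem.Str.isIn i hack = true
  · rw [if_pos hi, if_pos hi, List.foldl_filter]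
    apply PySem.List.foldl_congr_mem
    intro a j _
    simp [Bool.and_eq_true, and_true]
  · rw [if_neg hi, if_neg hi, List.foldl_nil]

theorem mem_dominated (hack : String) (ks : List String) (k : String) :
    (pvAltDominated hack ks).contains k = true ↔ k ∈ pvZs hack ks := by
  rw [dominated_eq]
  have h1 : (((pvZs hack ks).foldl (fun s j => PySem.Set.add s j) []).contains k = true)
      ↔ k ∈ (pvZs hack ks).foldl (fun s j => PySem.Set.add s j) ([] : PySem.Set String) := by
    simp [PySem.Set.contains]
  rw [h1, PySem.Set.mem_foldl_add (pvZs hack ks) (fun b => b) ([] : PySem.Set String) k]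
  simp

theorem counts_getD (hack : String) (ks : List String) (hnd : ks.Nodup) (k : String)
    (hk : k ∈ ks) : (pvAltCounts hack ks).getD k 0 = (PySem.Str.count hack k : Int) := by
  have hfst : (ks.map (fun p => (p, (PySem.Str.count hack p : Int)))).map Prod.fst = ks := by
    rw [List.map_map]
    have hid : (Prod.fst ∘ fun p : String => (p, (PySem.Str.count hack p : Int))) = id := by
      funext p; rfl
    rw [hid, List.map_id]
  have hitems : (pvAltCounts hack ks).items = ks.map (fun p => (p, (PySem.Str.count hack p : Int))) :=
    items_ofList_nodup _ (by rw [hfst]; exact hnd)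
  have hmem : (k, (PySem.Str.count hack k : Int)) ∈ (pvAltCounts hack ks).items := by
    rw [hitems]; exact List.mem_map.2 ⟨k, hk, rfl⟩
  exact PySem.Dict.getD_of_mem_items _ hmem (PySem.Dict.nodup_keys_ofList _) 0

theorem phrases_eq (hack : String) (phrases : List (String × Int)) :
    pvSumPhrases hack phrases =
      (((pvKeys phrases).filter
            (fun p => !((pvAltDominated hack (pvKeys phrases)).contains p))).map
          (fun p => (pvAltCounts hack (pvKeys phrases)).getD p 0 * pvVal phrases p)).sum
      + (((pvKeys phrases).filter (fun i => PySem.Str.isIn i hack)).flatMap (fun i =>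
          ((pvKeys phrases).filter (fun j =>
              decide (j ≠ i) && PySem.Str.isIn j i &&
                decide ((pvAltCounts hack (pvKeys phrases)).getD j 0 >
                  (pvAltCounts hack (pvKeys phrases)).getD i 0))).map
            (fun j => pvVal phrases j))).sum := by
  simp only [pvSumPhrases]
  set ks := pvKeys phrases with hks
  have hknd : ks.Nodup := PySem.List.nodup_dedup _
  have hzsub : ∀ j ∈ pvZs hack ks, j ∈ ks := by
    intro j hj
    unfold pvZs at hj
    rcases List.mem_flatMap.1 hj with ⟨i, _, hji⟩
    split at hji
    · exact (List.mem_filter.1 hji).1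
    · simp at hji
  have hfstp : ((ks.map (fun k => (k, pvVal phrases k))).map Prod.fst) = ks := by
    rw [List.map_map]
    have hid : (Prod.fst ∘ fun k : String => (k, pvVal phrases k)) = id := by funext p; rfl
    rw [hid, List.map_id]
  have hitems0 : (PySem.Dict.ofList (ks.map (fun k => (k, pvVal phrases k)))).items
      = ks.map (fun k => (k, pvVal phrases k)) := items_ofList_nodup _ (by rw [hfstp]; exact hknd)
  have hkeys0 : (PySem.Dict.ofList (ks.map (fun k => (k, pvVal phrases k)))).keys = ks := by
    simp only [PySem.Dict.keys]
    rw [hitems0, List.map_map]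
    have hid : ((fun p : String × Int => p.1) ∘ fun k : String => (k, pvVal phrases k)) = id := by
      funext p; rfl
    rw [hid, List.map_id]
  have hcont : ∀ j ∈ pvZs hack ks,
      (PySem.Dict.ofList (ks.map (fun k => (k, pvVal phrases k)))).contains j = true := by
    intro j hj
    rw [PySem.Dict.contains_iff_mem_keys, hkeys0]
    exact hzsub j hj
  -- the first phrase sum, in closed form
  have hs1 : ((ks.foldl (fun d i =>
        ks.foldl (fun d j =>
          if j ≠ i ∧ PySem.Str.isIn j i = true ∧ PySem.Str.isIn i hack = true
          then d.insert j 0 else d) d)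
        (PySem.Dict.ofList (ks.map (fun k => (k, pvVal phrases k))))).items).foldl
          (fun s p => s + pvCountPhrase hack p.1 p.2) 0
      = (ks.map (fun k => if k ∈ pvZs hack ks then 0
          else (PySem.Str.count hack k : Int) * pvVal phrases k)).sum := by
    rw [pv_dominance_fold_eq hack ks (fun d j => d.insert j (0 : Int))
        (PySem.Dict.ofList (ks.map (fun k => (k, pvVal phrases k)))),
      items_foldl_insert_zero _ _ hcont, hitems0, PySem.List.foldl_add, List.map_map,
      List.map_map]
    simp only [zero_add]
    apply congrArg List.sum
    apply List.map_congr_left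
    intro k _
    by_cases hz : k ∈ pvZs hack ks
    · simp [Function.comp, hz, pvCountPhrase]
    · simp [Function.comp, hz, pvCountPhrase]
  -- the third loop, in closed form
  have hthird : ∀ s : Int,
      ks.foldl (fun s i =>
        ks.foldl (fun s j =>
          if j ≠ i ∧ PySem.Str.isIn j i = true ∧ PySem.Str.isIn i hack = true ∧
             PySem.Str.count hack j > PySem.Str.count hack i
          then s + pvVal phrases j else s) s) s
      = s + (ks.map (fun i =>
          ((ks.filter (fun j =>
              decide (j ≠ i) && PySem.Str.isIn j i && PySem.Str.isIn i hack &&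
                decide (PySem.Str.count hack j > PySem.Str.count hack i))).map
            (fun j => pvVal phrases j)).sum)).sum := by
    intro s
    have hstep : ∀ (a : Int), ∀ i ∈ ks,
        ks.foldl (fun s j =>
          if j ≠ i ∧ PySem.Str.isIn j i = true ∧ PySem.Str.isIn i hack = true ∧
             PySem.Str.count hack j > PySem.Str.count hack i
          then s + pvVal phrases j else s) a
        = a + ((ks.filter (fun j =>
              decide (j ≠ i) && PySem.Str.isIn j i && PySem.Str.isIn i hack &&
                decide (PySem.Str.count hack j > PySem.Str.count hack i))).map
            (fun j => pvVal phrases j)).sum := by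
      intro a i _
      have h1 : ks.foldl (fun s j =>
          if j ≠ i ∧ PySem.Str.isIn j i = true ∧ PySem.Str.isIn i hack = true ∧
             PySem.Str.count hack j > PySem.Str.count hack i
          then s + pvVal phrases j else s) a
          = ks.foldl (fun s j =>
            if (decide (j ≠ i) && PySem.Str.isIn j i && PySem.Str.isIn i hack &&
                decide (PySem.Str.count hack j > PySem.Str.count hack i)) = true
            then s + pvVal phrases j else s) a := by
        apply PySem.List.foldl_congr_mem
        intro b j _
        simp [Bool.and_eq_true, and_assoc]
      rw [h1, ← List.foldl_filter, PySem.List.foldl_add]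
    rw [PySem.List.foldl_congr_mem ks _
      (fun s i => s + ((ks.filter (fun j =>
          decide (j ≠ i) && PySem.Str.isIn j i && PySem.Str.isIn i hack &&
            decide (PySem.Str.count hack j > PySem.Str.count hack i))).map
        (fun j => pvVal phrases j)).sum) s hstep]
    rw [PySem.List.foldl_add]
  rw [hs1, hthird]
  -- B's second sum equals the first closed form
  have ht2 : ((ks.filter (fun p => !((pvAltDominated hack ks).contains p))).map
        (fun p => (pvAltCounts hack ks).getD p 0 * pvVal phrases p)).sum
      = (ks.map (fun k => if k ∈ pvZs hack ks then 0
          else (PySem.Str.count hack k : Int) * pvVal phrases k)).sum := by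
    rw [sum_filter_map]
    apply congrArg List.sum
    apply List.map_congr_left
    intro k hkmem
    by_cases hz : k ∈ pvZs hack ks
    · have hc : (pvAltDominated hack ks).contains k = true := (mem_dominated hack ks k).2 hz
      rw [hc, if_pos hz]
      rfl
    · have hc : (pvAltDominated hack ks).contains k = false := by
        rw [← Bool.not_eq_true]
        exact fun h => hz ((mem_dominated hack ks k).1 h)
      rw [hc, if_neg hz, counts_getD hack ks hknd k hkmem]
      rfl
  -- B's third sum equals the third closed form
  have ht3 : ((ks.filter (fun i => PySem.Str.isIn i hack)).flatMap (fun i =>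
        ((ks.filter (fun j =>
            decide (j ≠ i) && PySem.Str.isIn j i &&
              decide ((pvAltCounts hack ks).getD j 0 > (pvAltCounts hack ks).getD i 0))).map
          (fun j => pvVal phrases j)))).sum
      = (ks.map (fun i =>
          ((ks.filter (fun j =>
              decide (j ≠ i) && PySem.Str.isIn j i && PySem.Str.isIn i hack &&
                decide (PySem.Str.count hack j > PySem.Str.count hack i))).map
            (fun j => pvVal phrases j)).sum)).sum := by
    rw [sum_flatMap_int, sum_filter_map]
    apply congrArg List.sum
    apply List.map_congr_left
    intro i himem
    by_cases hi : PySem.Str.isIn i hack = true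
    · rw [if_pos hi]
      have hfe : ks.filter (fun j =>
            decide (j ≠ i) && PySem.Str.isIn j i &&
              decide ((pvAltCounts hack ks).getD j 0 > (pvAltCounts hack ks).getD i 0))
          = ks.filter (fun j =>
            decide (j ≠ i) && PySem.Str.isIn j i && PySem.Str.isIn i hack &&
              decide (PySem.Str.count hack j > PySem.Str.count hack i)) := by
        apply List.filter_congr
        intro j hjmem
        rw [counts_getD hack ks hknd j hjmem, counts_getD hack ks hknd i himem]
        have hi' : PySem.Chars.isIn i.toList hack.toList = true := by simpa using hi
        simp [hi', Bool.and_assoc, gt_iff_lt, Nat.cast_lt]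
      rw [hfe]
    · rw [if_neg hi]
      rw [Bool.not_eq_true] at hi
      have h0 : ks.filter (fun j =>
            decide (j ≠ i) && PySem.Str.isIn j i && PySem.Str.isIn i hack &&
              decide (PySem.Str.count hack j > PySem.Str.count hack i)) = [] := by
        rw [List.filter_eq_nil_iff]
        intro j _
        have hi' : PySem.Chars.isIn i.toList hack.toList = false := by simpa using hi
        simp [hi']
      rw [h0]
      rfl
  rw [ht2, ht3]

theorem sumLetters_eq (hack : String) (letters : List (String × Int)) :
    pvSumLetters hack letters
      = (pvKeys letters).foldl (fun s k =>
          if 0 < pvVal letters k then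
            s + PySem.Int.floordiv
                  (pvVal letters k * (PySem.Str.count hack k : Int) *
                    ((PySem.Str.count hack k : Int) + 1)) 2
          else s) 0 := by
  unfold pvSumLetters
  apply PySem.List.foldl_congr_mem
  intro s k _
  rw [pvCountLetter_closed]
  by_cases h : 0 < pvVal letters k
  · rw [if_pos h, if_pos h]
  · rw [if_neg h, if_neg h, add_zero]

theorem full_power_spec' (hack : String) (letters : List (String × Int)) (phrases : List (String × Int)) :
    full_power hack letters phrases = full_power_alt hack letters phrases := by
  rw [full_power_alt_unfold]
  unfold full_power
  have hcnt : (pvKeys letters).foldl (fun s k => s + (PySem.Str.count hack k : Int)) 0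
      = ((pvKeys letters).map (fun k => (PySem.Str.count hack k : Int))).sum := by
    rw [PySem.List.foldl_add]; ring
  cases hscan : pvAltScan hack (pvKeys letters) 0 with
  | none =>
      rw [Option.elim_none]
      have hlt := (scan_spec hack (pvKeys letters) 0).2 hscan
      rw [if_neg (by rw [hcnt]; omega)]
  | some a =>
      rw [Option.elim_some]
      have ha : a = ((pvKeys letters).map (fun k => (PySem.Str.count hack k : Int))).sum := by
        have := (scan_spec hack (pvKeys letters) 0).1 a hscan
        omega
      by_cases hlen : ((pvKeys letters).map (fun k => (PySem.Str.count hack k : Int))).sum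
          = PySem.Str.len hack
      · rw [if_pos (by rw [hcnt]; exact hlen), if_neg (by rw [ha]; simpa using hlen)]
        rw [sumLetters_eq, phrases_eq]
        ring
      · rw [if_neg (by rw [hcnt]; exact hlen), if_pos (by rw [ha]; exact hlen)]

-- ===== VERDICT (by name: the statement is the Claim_ definition above) =====
theorem full_power_spec : Claim_equal_full_power := by
  intro hack letters phrases _
  unfold Spec_full_power
  exact full_power_spec' hack letters phrases
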